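-- pv_equiv track=rewrite | github.com/SaiKundarapu/Mission-RnD-2018-Python | unit3tests/factormath.py | get_lcm
-- ===== SOURCE A (Python) =====
-- def get_lcm(first,second):
--     lcm = []
--     i = 0;j = 0
--     while (i < len(first) and j < len(second)):
--         if first[i][0] == second[j][0]:
--             if first[i][1] > second[j][1]:
--                 lcm.append(first[i])
--             else:
--                 lcm.append(second[j])
--             i += 1;j += 1
--         elif first[i][0] > second[j][0]:
--             lcm.append(second[j])
--             j += 1
--         else:
--             lcm.append(first[i])
--             i += 1
--     while i<len(first):
--         lcm.append(first[i])
--         i+=1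
--     while j<len(second):
--         lcm.append(second[j])
--         j+=1
--     return lcm
-- ===== SOURCE B (Python) =====
-- def get_lcm(first, second):
--     if not first:
--         return list(second)
--     if not second:
--         return list(first)
--     (p, e), (q, f) = first[0], second[0]
--     if p == q:
--         head = first[0] if e > f else second[0]
--         return [head] + get_lcm(first[1:], second[1:])
--     if p > q:
--         return [second[0]] + get_lcm(first, second[1:])
--     return [first[0]] + get_lcm(first[1:], second)
-- ===== Notes on version B (the rewrite author's own statement) =====
-- stated objective: simpler
-- what changed: Replaces A's three index-driven while loops with a mutable accumulator by a single direct structural recursion on the two lists (pattern-matching merge, output built front-to-back by cons), with the leftover-tail loops collapsing into the base cases.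
import Mathlib
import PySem

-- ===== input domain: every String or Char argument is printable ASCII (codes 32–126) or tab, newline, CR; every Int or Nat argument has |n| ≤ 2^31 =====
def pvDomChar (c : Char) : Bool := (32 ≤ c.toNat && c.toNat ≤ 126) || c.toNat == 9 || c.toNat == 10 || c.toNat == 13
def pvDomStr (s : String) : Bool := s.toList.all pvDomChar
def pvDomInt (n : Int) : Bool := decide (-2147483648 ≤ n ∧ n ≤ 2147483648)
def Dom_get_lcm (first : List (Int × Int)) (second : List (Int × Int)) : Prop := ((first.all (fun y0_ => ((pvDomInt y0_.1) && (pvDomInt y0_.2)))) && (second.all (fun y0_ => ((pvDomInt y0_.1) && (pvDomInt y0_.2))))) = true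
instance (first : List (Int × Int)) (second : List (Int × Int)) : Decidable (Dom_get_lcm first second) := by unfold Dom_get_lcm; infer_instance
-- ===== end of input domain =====

-- B replaces A's three index-driven while loops and append-accumulator with a direct
-- structural recursion on the two lists (objective: simpler; not faster).

-- ===== PORT A =====
-- tail loop `while i < len(first): lcm.append(first[i]); i += 1`
def get_lcm_drain (xs : List (Int × Int)) (i : Nat) (lcm : List (Int × Int)) : List (Int × Int) :=
  if h : i < xs.length then get_lcm_drain xs (i + 1) (lcm ++ [xs[i]]) else lcm
termination_by xs.length - i

-- main `while (i < len(first) and j < len(second))` loop, then the two drain loops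
def get_lcm_loop (first second : List (Int × Int)) (i j : Nat) (lcm : List (Int × Int)) :
    List (Int × Int) :=
  if h : i < first.length ∧ j < second.length then
    let a := first[i]'h.1
    let b := second[j]'h.2
    if a.1 = b.1 then
      if a.2 > b.2 then get_lcm_loop first second (i + 1) (j + 1) (lcm ++ [a])
      else get_lcm_loop first second (i + 1) (j + 1) (lcm ++ [b])
    else if a.1 > b.1 then get_lcm_loop first second i (j + 1) (lcm ++ [b])
    else get_lcm_loop first second (i + 1) j (lcm ++ [a])
  else
    get_lcm_drain second j (get_lcm_drain first i lcm)
termination_by (first.length - i) + (second.length - j)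
decreasing_by all_goals omega

def get_lcm (first : List (Int × Int)) (second : List (Int × Int)) : List (Int × Int) :=
  get_lcm_loop first second 0 0 []

-- ===== PORT B =====
def get_lcm_alt (first : List (Int × Int)) (second : List (Int × Int)) : List (Int × Int) :=
  match first, second with
  | [], _ => second
  | _, [] => first
  | (p, e) :: ft, (q, f) :: st =>
    if p = q then
      (if e > f then (p, e) else (q, f)) :: get_lcm_alt ft st
    else if p > q then
      (q, f) :: get_lcm_alt ((p, e) :: ft) st
    else
      (p, e) :: get_lcm_alt ft ((q, f) :: st)
termination_by first.length + second.length
decreasing_by all_goals (simp; try omega)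

-- ===== PRECONDITION & SPEC =====
def Spec_get_lcm (first : List (Int × Int)) (second : List (Int × Int)) (out : List (Int × Int)) : Prop := out = get_lcm_alt first second
instance (first : List (Int × Int)) (second : List (Int × Int)) (out : List (Int × Int)) : Decidable (Spec_get_lcm first second out) := by unfold Spec_get_lcm; infer_instance

-- ===== CLAIM (what is proved, stated in full; the proofs are below) =====
def Claim_equal_get_lcm : Prop := ∀ (first : List (Int × Int)) (second : List (Int × Int)), Dom_get_lcm first second → Spec_get_lcm first second (get_lcm first second)

-- ===== LEMMAS AND PROOFS =====

theorem get_lcm_drain_eq (xs : List (Int × Int)) (i : Nat) (lcm : List (Int × Int)) :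
    get_lcm_drain xs i lcm = lcm ++ xs.drop i := by
  rw [get_lcm_drain]
  split
  · rename_i h
    rw [get_lcm_drain_eq xs (i + 1), List.drop_eq_getElem_cons h]
    simp
  · rename_i h
    rw [List.drop_eq_nil_of_le (by omega)]
    simp
termination_by xs.length - i

theorem get_lcm_alt_nil_right (xs : List (Int × Int)) : get_lcm_alt xs [] = xs := by
  cases xs <;> simp [get_lcm_alt]

theorem get_lcm_loop_eq (first second : List (Int × Int)) (i j : Nat) (lcm : List (Int × Int)) :
    get_lcm_loop first second i j lcm = lcm ++ get_lcm_alt (first.drop i) (second.drop j) := by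
  rw [get_lcm_loop]
  split
  · rename_i h
    rw [List.drop_eq_getElem_cons h.1, List.drop_eq_getElem_cons h.2]
    simp only
    split
    · rename_i heq
      split
      · rename_i hgt
        rw [get_lcm_loop_eq first second (i + 1) (j + 1)]
        rcases hA : (first[i]'h.1) with ⟨p, e⟩
        rcases hB : (second[j]'h.2) with ⟨q, f⟩
        simp only [hA, hB] at heq hgt
        simp at heq hgt
        simp [get_lcm_alt, heq, hgt]
      · rename_i hle
        rw [get_lcm_loop_eq first second (i + 1) (j + 1)]
        rcases hA : (first[i]'h.1) with ⟨p, e⟩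
        rcases hB : (second[j]'h.2) with ⟨q, f⟩
        simp only [hA, hB] at heq hle
        simp at heq hle
        simp [get_lcm_alt, heq, hle]
    · rename_i hne
      split
      · rename_i hgt
        rw [get_lcm_loop_eq first second i (j + 1)]
        rw [List.drop_eq_getElem_cons h.1]
        rcases hA : (first[i]'h.1) with ⟨p, e⟩
        rcases hB : (second[j]'h.2) with ⟨q, f⟩
        simp only [hA, hB] at hne hgt
        simp at hne hgt
        simp [get_lcm_alt, hne, hgt]
      · rename_i hle
        rw [get_lcm_loop_eq first second (i + 1) j]
        rw [List.drop_eq_getElem_cons h.2]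
        rcases hA : (first[i]'h.1) with ⟨p, e⟩
        rcases hB : (second[j]'h.2) with ⟨q, f⟩
        simp only [hA, hB] at hne hle
        simp at hne hle
        simp [get_lcm_alt, hne, hle]
  · rename_i h
    rw [get_lcm_drain_eq, get_lcm_drain_eq]
    rcases Nat.lt_or_ge i first.length with hi | hi
    · have hj : second.length ≤ j := by omega
      rw [List.drop_eq_nil_of_le hj, get_lcm_alt_nil_right]
      simp
    · rw [List.drop_eq_nil_of_le hi]
      cases hd : second.drop j <;> simp [get_lcm_alt]
termination_by (first.length - i) + (second.length - j)
decreasing_by all_goals omega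

-- ===== VERDICT (by name: the statement is the Claim_ definition above) =====
theorem get_lcm_spec : Claim_equal_get_lcm := by
  intro first second _
  unfold Spec_get_lcm get_lcm
  rw [get_lcm_loop_eq]
  simp
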